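-- pv_equiv track=rewrite | github.com/AaSiKu/Laminar-InterIIT-14.0 | backend/pipeline/metric_node.py | return_ordered_ancestors
-- ===== SOURCE A (Python) =====
-- from typing import Optional, Dict, List, Any
--
-- def return_ordered_ancestors(
--     metric_node_idx: int,
--     dependencies: Dict[int, List[int]],
--     parsing_order: List[int]
-- ):
--      # Find all ancestors of the metric node
--     ancestors = set()
--     to_visit = [metric_node_idx]
--
--     while to_visit:
--         current = to_visit.pop()
--         if current in ancestors:
--             continue
--         ancestors.add(current)
--
--         # Add parent nodes to visit
--         if current in dependencies:
--             to_visit.extend(dependencies[current])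
--
--     # Get ancestors in topological order
--     ordered_ancestors = [idx for idx in parsing_order if idx in ancestors]
--     return ordered_ancestors
-- ===== SOURCE B (Python) =====
-- def return_ordered_ancestors(
--     metric_node_idx: int,
--     dependencies,
--     parsing_order,
-- ):
--     # Breadth-first saturation: process the frontier level by level instead of
--     # popping nodes one at a time from an explicit stack.
--     ancestors = set()
--     frontier = [metric_node_idx]
--     while frontier:
--         next_frontier = []
--         for node in frontier:
--             if node not in ancestors:
--                 ancestors.add(node)
--                 next_frontier.extend(dependencies.get(node, []))
--         frontier = next_frontier
--     return [idx for idx in parsing_order if idx in ancestors]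
-- ===== Notes on version B (the rewrite author's own statement) =====
-- stated objective: alternative
-- what changed: Replaced the LIFO-stack DFS worklist (pop one node, push its parents, re-test membership per pop) with a breadth-first level saturation: each round processes the whole frontier with a for-loop and builds the next frontier, so the traversal order and the maintained state (generations instead of a stack) are different while the computed ancestor set is provably the same reachable set.
import Mathlib
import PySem

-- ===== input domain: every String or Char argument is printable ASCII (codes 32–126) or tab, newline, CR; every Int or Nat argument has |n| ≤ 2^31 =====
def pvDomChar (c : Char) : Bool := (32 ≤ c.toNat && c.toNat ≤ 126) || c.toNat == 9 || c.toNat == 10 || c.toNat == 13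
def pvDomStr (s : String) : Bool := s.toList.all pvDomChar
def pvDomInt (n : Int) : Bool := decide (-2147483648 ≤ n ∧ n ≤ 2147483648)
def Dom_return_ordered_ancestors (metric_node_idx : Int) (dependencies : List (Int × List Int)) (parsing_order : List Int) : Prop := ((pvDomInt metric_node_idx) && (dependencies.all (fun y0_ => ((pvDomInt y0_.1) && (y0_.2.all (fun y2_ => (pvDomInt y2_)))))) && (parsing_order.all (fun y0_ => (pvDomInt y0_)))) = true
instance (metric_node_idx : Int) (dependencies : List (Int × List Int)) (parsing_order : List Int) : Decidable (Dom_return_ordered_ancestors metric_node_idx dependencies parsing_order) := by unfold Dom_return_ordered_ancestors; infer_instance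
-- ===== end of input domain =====

-- B replaces A's LIFO-stack DFS worklist with a breadth-first level-by-level
-- saturation (objective: alternative algorithm of the same cost; the final
-- filter over parsing_order is unchanged).

-- ===== PORT A =====
-- dict lookup (first match), Python 'current in dependencies' / 'dependencies[current]'
def pvDepsGet? (deps : List (Int × List Int)) (k : Int) : Option (List Int) :=
  (deps.find? (fun p => p.1 == k)).map (fun p => p.2)

-- the while-loop of A; the Lean stack list is the REVERSE of the Python list
-- (head = top), so 'pop()' = take the head and 'extend(l)' = 'l.reverse ++ ·'.
-- fuel is a termination guard only; the fuel passed by the port provably suffices.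
def pvLoopA (deps : List (Int × List Int)) : Nat → PySem.Set Int → List Int → PySem.Set Int
  | 0, anc, _ => anc
  | _ + 1, anc, [] => anc
  | f + 1, anc, cur :: rest =>
    if anc.contains cur then pvLoopA deps f anc rest
    else
      match pvDepsGet? deps cur with
      | some l => pvLoopA deps f (PySem.Set.add anc cur) (l.reverse ++ rest)
      | none   => pvLoopA deps f (PySem.Set.add anc cur) rest

def return_ordered_ancestors (metric_node_idx : Int) (dependencies : List (Int × List Int)) (parsing_order : List Int) : List Int :=
  let fuel := (dependencies.map (fun p => p.2.length)).sum + 2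
  let ancestors := pvLoopA dependencies fuel PySem.Set.empty [metric_node_idx]
  parsing_order.filter (fun idx => ancestors.contains idx)

-- ===== PORT B =====
-- Python 'dependencies.get(node, [])'
def pvGetDeps (deps : List (Int × List Int)) (k : Int) : List Int :=
  ((deps.find? (fun p => p.1 == k)).map (fun p => p.2)).getD []

-- body of the for-loop over one frontier level: state = (ancestors, next_frontier)
def pvStepB (deps : List (Int × List Int)) (st : PySem.Set Int × List Int) (node : Int) : PySem.Set Int × List Int :=
  if st.1.contains node then st
  else (PySem.Set.add st.1 node, st.2 ++ pvGetDeps deps node)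

-- the while-loop of B: one recursive step per level; fuel is a termination
-- guard only, the fuel passed by the port provably suffices.
def pvLoopB (deps : List (Int × List Int)) : Nat → PySem.Set Int → List Int → PySem.Set Int
  | 0, anc, _ => anc
  | _ + 1, anc, [] => anc
  | f + 1, anc, x :: xs =>
    let st := (x :: xs).foldl (pvStepB deps) (anc, [])
    pvLoopB deps f st.1 st.2

def return_ordered_ancestors_alt (metric_node_idx : Int) (dependencies : List (Int × List Int)) (parsing_order : List Int) : List Int :=
  let univ := metric_node_idx :: dependencies.flatMap (fun p => p.2)
  let fuel := univ.length + 1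
  let ancestors := pvLoopB dependencies fuel PySem.Set.empty [metric_node_idx]
  parsing_order.filter (fun idx => ancestors.contains idx)

-- ===== PRECONDITION & SPEC =====
def Spec_return_ordered_ancestors (metric_node_idx : Int) (dependencies : List (Int × List Int)) (parsing_order : List Int) (out : List Int) : Prop := out = return_ordered_ancestors_alt metric_node_idx dependencies parsing_order
instance (metric_node_idx : Int) (dependencies : List (Int × List Int)) (parsing_order : List Int) (out : List Int) : Decidable (Spec_return_ordered_ancestors metric_node_idx dependencies parsing_order out) := by unfold Spec_return_ordered_ancestors; infer_instance

-- ===== CLAIM (what is proved, stated in full; the proofs are below) =====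
def Claim_equal_return_ordered_ancestors : Prop := ∀ (metric_node_idx : Int) (dependencies : List (Int × List Int)) (parsing_order : List Int), Dom_return_ordered_ancestors metric_node_idx dependencies parsing_order → Spec_return_ordered_ancestors metric_node_idx dependencies parsing_order (return_ordered_ancestors metric_node_idx dependencies parsing_order)

-- ===== LEMMAS AND PROOFS =====

-- the successor list of a node (both ports look it up the same way)
def pvChildren (deps : List (Int × List Int)) (k : Int) : List Int :=
  ((deps.find? (fun p => p.1 == k)).map (fun p => p.2)).getD []

-- reachability along dependency edges: the set both loops compute
inductive pvReach (deps : List (Int × List Int)) : Int → Int → Prop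
  | refl (x : Int) : pvReach deps x x
  | step {x c y : Int} (hc : c ∈ pvChildren deps x) (h : pvReach deps c y) : pvReach deps x y

-- total length of dependency lists whose key is not yet visited (A's potential)
def pvRemain : List (Int × List Int) → PySem.Set Int → Nat
  | [], _ => 0
  | p :: t, anc => (if anc.contains p.1 then 0 else p.2.length) + pvRemain t anc

-- number of universe elements not yet visited (B's potential)
def pvM (univ : List Int) (anc : PySem.Set Int) : Nat := univ.countP (fun y => !(anc.contains y))

theorem pv_contains_iff (s : PySem.Set Int) (x : Int) : s.contains x = true ↔ x ∈ s :=
  PySem.Set.contains_iff s x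

theorem pvRemain_mono (deps : List (Int × List Int)) (anc anc' : PySem.Set Int)
    (h : ∀ x ∈ anc, x ∈ anc') : pvRemain deps anc' ≤ pvRemain deps anc := by
  induction deps with
  | nil => simp [pvRemain]
  | cons p t ih =>
    simp only [pvRemain]
    have hterm : (if anc'.contains p.1 then 0 else p.2.length) ≤ (if anc.contains p.1 then 0 else p.2.length) := by
      cases hp : anc.contains p.1 with
      | false =>
        rw [if_neg Bool.false_ne_true]
        split <;> omega
      | true =>
        have h2 : anc'.contains p.1 = true := by
          rw [pv_contains_iff] at hp ⊢; exact h _ hp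
        rw [h2]
    omega

theorem pvRemain_add (deps : List (Int × List Int)) (anc : PySem.Set Int) (cur : Int)
    (h : anc.contains cur = false) :
    pvRemain deps (PySem.Set.add anc cur) + (pvChildren deps cur).length ≤ pvRemain deps anc := by
  induction deps with
  | nil => simp [pvRemain, pvChildren]
  | cons p t ih =>
    by_cases hp : p.1 == cur
    · have hp' : p.1 = cur := by simpa using hp
      have h1 : (PySem.Set.add anc cur).contains p.1 = true := by
        rw [pv_contains_iff, hp']
        exact (PySem.Set.mem_add anc cur cur).mpr (Or.inr rfl)
      have h2 : anc.contains p.1 = false := by rw [hp']; exact h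
      have hch : pvChildren (p :: t) cur = p.2 := by
        simp [pvChildren, List.find?, hp]
      have hmono : pvRemain t (PySem.Set.add anc cur) ≤ pvRemain t anc := by
        apply pvRemain_mono
        intro x hx
        exact (PySem.Set.mem_add anc cur x).mpr (Or.inl hx)
      simp only [pvRemain, h1, if_true]
      rw [h2, if_neg Bool.false_ne_true, hch]
      omega
    · have hne : p.1 ≠ cur := by simpa using hp
      have hc : (PySem.Set.add anc cur).contains p.1 = anc.contains p.1 := by
        by_cases hm : p.1 ∈ anc
        · have : p.1 ∈ PySem.Set.add anc cur := (PySem.Set.mem_add anc cur p.1).mpr (Or.inl hm)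
          rw [(pv_contains_iff _ _).mpr this, (pv_contains_iff _ _).mpr hm]
        · have : p.1 ∉ PySem.Set.add anc cur := by
            intro hmem
            rcases (PySem.Set.mem_add anc cur p.1).mp hmem with h' | h'
            · exact hm h'
            · exact hne h'
          have e1 : (PySem.Set.add anc cur).contains p.1 = false := by
            rw [Bool.eq_false_iff]; intro hh; exact this ((pv_contains_iff _ _).mp hh)
          have e2 : anc.contains p.1 = false := by
            rw [Bool.eq_false_iff]; intro hh; exact hm ((pv_contains_iff _ _).mp hh)
          rw [e1, e2]
      have hch : pvChildren (p :: t) cur = pvChildren t cur := by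
        simp [pvChildren, List.find?, hp]
      simp only [pvRemain, hc, hch]
      omega

theorem pvRemain_empty (deps : List (Int × List Int)) :
    pvRemain deps [] = (deps.map (fun p => p.2.length)).sum := by
  induction deps with
  | nil => simp [pvRemain]
  | cons p t ih => simp [pvRemain, ih]

theorem pvChildren_subset (deps : List (Int × List Int)) (x c : Int)
    (h : c ∈ pvChildren deps x) : c ∈ deps.flatMap (fun p => p.2) := by
  unfold pvChildren at h
  cases hf : deps.find? (fun p => p.1 == x) with
  | none => rw [hf] at h; simp at h
  | some p =>
    rw [hf] at h
    simp only [Option.map_some, Option.getD_some] at h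
    exact List.mem_flatMap.mpr ⟨p, List.mem_of_find?_eq_some hf, h⟩

theorem pvReach_closed (deps : List (Int × List Int)) (r : List Int)
    (hcl : ∀ a ∈ r, ∀ c ∈ pvChildren deps a, c ∈ r)
    (x y : Int) (hr : pvReach deps x y) (hx : x ∈ r) : y ∈ r := by
  induction hr with
  | refl => exact hx
  | step hc _ ih => exact ih (hcl _ hx _ hc)

theorem pvM_lt (univ : List Int) (anc : PySem.Set Int) (x : Int) (hx : x ∈ univ)
    (h : anc.contains x = false) : pvM univ (PySem.Set.add anc x) < pvM univ anc := by
  unfold pvM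
  induction univ with
  | nil => simp at hx
  | cons u t ih =>
    have hle : t.countP (fun y => !(PySem.Set.add anc x).contains y) ≤ t.countP (fun y => !anc.contains y) := by
      apply List.countP_mono_left
      intro a _ ha
      simp only [Bool.not_eq_true', Bool.eq_false_iff] at ha ⊢
      intro hc; apply ha
      rw [pv_contains_iff] at hc ⊢
      exact (PySem.Set.mem_add anc x a).mpr (Or.inl hc)
    have c0 : (if (!(true : Bool)) = true then (1:Nat) else 0) = 0 := rfl
    have c1 : (if (!(false : Bool)) = true then (1:Nat) else 0) = 1 := rfl
    simp only [List.countP_cons]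
    rcases List.mem_cons.mp hx with hu | hu
    · subst hu
      have e1 : (PySem.Set.add anc x).contains x = true := by
        rw [pv_contains_iff]; exact (PySem.Set.mem_add anc x x).mpr (Or.inr rfl)
      rw [e1, h, c0, c1]
      omega
    · have hlt := ih hu
      cases hc : anc.contains u with
      | true =>
        have e2 : (PySem.Set.add anc x).contains u = true := by
          rw [pv_contains_iff] at hc ⊢
          exact (PySem.Set.mem_add anc x u).mpr (Or.inl hc)
        rw [e2, c0]
        omega
      | false =>
        rw [c1]
        cases hc2 : (PySem.Set.add anc x).contains u with
        | true => rw [c0]; omega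
        | false => rw [c1]; omega

-- ---- A's loop ----

theorem pvLoopA_sound (deps : List (Int × List Int)) :
    ∀ (fuel : Nat) (anc stack : List Int) (y : Int),
      y ∈ pvLoopA deps fuel anc stack → y ∈ anc ∨ ∃ x ∈ stack, pvReach deps x y := by
  intro fuel
  induction fuel with
  | zero =>
    intro anc stack y hy
    exact Or.inl hy
  | succ f ih =>
    intro anc stack y hy
    cases stack with
    | nil => exact Or.inl hy
    | cons cur rest =>
      by_cases hc : anc.contains cur = true
      · have hm : cur ∈ anc := (pv_contains_iff anc cur).mp hc
        rw [show pvLoopA deps (f+1) anc (cur :: rest) = pvLoopA deps f anc rest by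
            simp [pvLoopA, hm]] at hy
        rcases ih anc rest y hy with h1 | ⟨x, hx, hr⟩
        · exact Or.inl h1
        · exact Or.inr ⟨x, List.mem_cons_of_mem _ hx, hr⟩
      · have hm : cur ∉ anc := fun hmm => hc ((pv_contains_iff anc cur).mpr hmm)
        cases hf : pvDepsGet? deps cur with
        | some l =>
          rw [show pvLoopA deps (f+1) anc (cur :: rest)
                = pvLoopA deps f (PySem.Set.add anc cur) (l.reverse ++ rest) by
              simp [pvLoopA, hm, hf]] at hy
          have hch : pvChildren deps cur = l := by
            show (pvDepsGet? deps cur).getD [] = l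
            rw [hf]; rfl
          rcases ih _ _ y hy with h1 | ⟨x, hx, hr⟩
          · rcases (PySem.Set.mem_add anc cur y).mp h1 with h2 | h2
            · exact Or.inl h2
            · exact Or.inr ⟨cur, List.mem_cons_self, h2 ▸ pvReach.refl y⟩
          · rcases List.mem_append.mp hx with h2 | h2
            · refine Or.inr ⟨cur, List.mem_cons_self, pvReach.step ?_ hr⟩
              rw [hch]
              exact List.mem_reverse.mp h2
            · exact Or.inr ⟨x, List.mem_cons_of_mem _ h2, hr⟩
        | none =>
          rw [show pvLoopA deps (f+1) anc (cur :: rest)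
                = pvLoopA deps f (PySem.Set.add anc cur) rest by
              simp [pvLoopA, hm, hf]] at hy
          rcases ih _ _ y hy with h1 | ⟨x, hx, hr⟩
          · rcases (PySem.Set.mem_add anc cur y).mp h1 with h2 | h2
            · exact Or.inl h2
            · exact Or.inr ⟨cur, List.mem_cons_self, h2 ▸ pvReach.refl y⟩
          · exact Or.inr ⟨x, List.mem_cons_of_mem _ hx, hr⟩

theorem pvLoopA_main (deps : List (Int × List Int)) :
    ∀ (fuel : Nat) (anc stack : List Int),
      stack.length + pvRemain deps anc < fuel →
      (∀ a ∈ anc, ∀ c ∈ pvChildren deps a, c ∈ anc ∨ c ∈ stack) →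
      (∀ a ∈ anc, a ∈ pvLoopA deps fuel anc stack) ∧
      (∀ x ∈ stack, x ∈ pvLoopA deps fuel anc stack) ∧
      (∀ a ∈ pvLoopA deps fuel anc stack, ∀ c ∈ pvChildren deps a, c ∈ pvLoopA deps fuel anc stack) := by
  intro fuel
  induction fuel with
  | zero =>
    intro anc stack hphi _
    exact absurd hphi (Nat.not_lt_zero _)
  | succ f ih =>
    intro anc stack hphi hinv
    cases stack with
    | nil =>
      have heq : pvLoopA deps (f+1) anc [] = anc := by simp [pvLoopA]
      rw [heq]
      refine ⟨fun a ha => ha, by simp, fun a ha c hcch => ?_⟩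
      rcases hinv a ha c hcch with h1 | h1
      · exact h1
      · simp at h1
    | cons cur rest =>
      by_cases hc : anc.contains cur = true
      · have hmem : cur ∈ anc := (pv_contains_iff anc cur).mp hc
        have heq : pvLoopA deps (f+1) anc (cur :: rest) = pvLoopA deps f anc rest := by
          simp [pvLoopA, hmem]
        have hphi' : rest.length + pvRemain deps anc < f := by
          simp only [List.length_cons] at hphi; omega
        have hinv' : ∀ a ∈ anc, ∀ c ∈ pvChildren deps a, c ∈ anc ∨ c ∈ rest := by
          intro a ha c hcch
          rcases hinv a ha c hcch with h1 | h1
          · exact Or.inl h1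
          · rcases List.mem_cons.mp h1 with h2 | h2
            · exact Or.inl (h2 ▸ (pv_contains_iff anc cur).mp hc)
            · exact Or.inr h2
        obtain ⟨g1, g2, g3⟩ := ih anc rest hphi' hinv'
        rw [heq]
        refine ⟨g1, fun x hx => ?_, g3⟩
        rcases List.mem_cons.mp hx with h2 | h2
        · exact g1 x (h2 ▸ (pv_contains_iff anc cur).mp hc)
        · exact g2 x h2
      · have hcur : cur ∉ anc := fun hm => hc ((pv_contains_iff anc cur).mpr hm)
        have hcf : anc.contains cur = false := Bool.eq_false_iff.mpr hc
        cases hf : pvDepsGet? deps cur with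
        | some l =>
          have hch : pvChildren deps cur = l := by
            show (pvDepsGet? deps cur).getD [] = l
            rw [hf]; rfl
          have heq : pvLoopA deps (f+1) anc (cur :: rest)
              = pvLoopA deps f (PySem.Set.add anc cur) (l.reverse ++ rest) := by
            simp [pvLoopA, hcur, hf]
          have hrem := pvRemain_add deps anc cur hcf
          rw [hch] at hrem
          have hphi' : (l.reverse ++ rest).length + pvRemain deps (PySem.Set.add anc cur) < f := by
            simp only [List.length_append, List.length_reverse, List.length_cons] at hphi ⊢
            omega
          have hinv' : ∀ a ∈ PySem.Set.add anc cur, ∀ c ∈ pvChildren deps a,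
              c ∈ PySem.Set.add anc cur ∨ c ∈ l.reverse ++ rest := by
            intro a ha c hcch
            rcases (PySem.Set.mem_add anc cur a).mp ha with h1 | h1
            · rcases hinv a h1 c hcch with h2 | h2
              · exact Or.inl ((PySem.Set.mem_add anc cur c).mpr (Or.inl h2))
              · rcases List.mem_cons.mp h2 with h3 | h3
                · exact Or.inl ((PySem.Set.mem_add anc cur c).mpr (Or.inr h3))
                · exact Or.inr (List.mem_append_right _ h3)
            · subst h1
              rw [hch] at hcch
              exact Or.inr (List.mem_append_left _ (List.mem_reverse.mpr hcch))
          obtain ⟨g1, g2, g3⟩ := ih _ _ hphi' hinv'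
          rw [heq]
          refine ⟨fun a ha => g1 a ((PySem.Set.mem_add anc cur a).mpr (Or.inl ha)),
                  fun x hx => ?_, g3⟩
          rcases List.mem_cons.mp hx with h2 | h2
          · exact g1 x (h2 ▸ (PySem.Set.mem_add anc cur cur).mpr (Or.inr rfl))
          · exact g2 x (List.mem_append_right _ h2)
        | none =>
          have hch : pvChildren deps cur = [] := by
            show (pvDepsGet? deps cur).getD [] = []
            rw [hf]; rfl
          have heq : pvLoopA deps (f+1) anc (cur :: rest)
              = pvLoopA deps f (PySem.Set.add anc cur) rest := by
            simp [pvLoopA, hcur, hf]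
          have hrem := pvRemain_add deps anc cur hcf
          rw [hch] at hrem
          have hphi' : rest.length + pvRemain deps (PySem.Set.add anc cur) < f := by
            simp only [List.length_cons] at hphi
            simp only [List.length_nil] at hrem
            omega
          have hinv' : ∀ a ∈ PySem.Set.add anc cur, ∀ c ∈ pvChildren deps a,
              c ∈ PySem.Set.add anc cur ∨ c ∈ rest := by
            intro a ha c hcch
            rcases (PySem.Set.mem_add anc cur a).mp ha with h1 | h1
            · rcases hinv a h1 c hcch with h2 | h2
              · exact Or.inl ((PySem.Set.mem_add anc cur c).mpr (Or.inl h2))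
              · rcases List.mem_cons.mp h2 with h3 | h3
                · exact Or.inl ((PySem.Set.mem_add anc cur c).mpr (Or.inr h3))
                · exact Or.inr h3
            · subst h1
              rw [hch] at hcch
              simp at hcch
          obtain ⟨g1, g2, g3⟩ := ih _ _ hphi' hinv'
          rw [heq]
          refine ⟨fun a ha => g1 a ((PySem.Set.mem_add anc cur a).mpr (Or.inl ha)),
                  fun x hx => ?_, g3⟩
          rcases List.mem_cons.mp hx with h2 | h2
          · exact g1 x (h2 ▸ (PySem.Set.mem_add anc cur cur).mpr (Or.inr rfl))
          · exact g2 x h2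

theorem pvLoopA_mem_iff (deps : List (Int × List Int)) (m y : Int) :
    y ∈ pvLoopA deps ((deps.map (fun p => p.2.length)).sum + 2) PySem.Set.empty [m] ↔ pvReach deps m y := by
  have hemp : (PySem.Set.empty : PySem.Set Int) = [] := rfl
  constructor
  · intro hy
    rcases pvLoopA_sound deps _ _ _ y hy with h1 | ⟨x, hx, hr⟩
    · rw [hemp] at h1; simp at h1
    · rcases List.mem_cons.mp hx with h2 | h2
      · exact h2 ▸ hr
      · simp at h2
  · intro hr
    have hphi : ([m] : List Int).length + pvRemain deps PySem.Set.empty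
        < (deps.map (fun p => p.2.length)).sum + 2 := by
      rw [hemp, pvRemain_empty]
      simp
      omega
    obtain ⟨g1, g2, g3⟩ := pvLoopA_main deps ((deps.map (fun p => p.2.length)).sum + 2)
      PySem.Set.empty [m] hphi (by rw [hemp]; simp)
    exact pvReach_closed deps _ g3 m y hr (g2 m List.mem_cons_self)

-- ---- B's loop ----

theorem pvFoldB_mono (deps : List (Int × List Int)) :
    ∀ (l : List Int) (anc next : List Int),
      (∀ a ∈ anc, a ∈ (l.foldl (pvStepB deps) (anc, next)).1) ∧
      (∀ y ∈ next, y ∈ (l.foldl (pvStepB deps) (anc, next)).2) := by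
  intro l
  induction l with
  | nil =>
    intro anc next
    exact ⟨fun a ha => ha, fun y hy => hy⟩
  | cons x l ih =>
    intro anc next
    simp only [List.foldl_cons]
    by_cases hcb : anc.contains x = true
    · have hm : x ∈ anc := (pv_contains_iff anc x).mp hcb
      have hs : pvStepB deps (anc, next) x = (anc, next) := by simp [pvStepB, hm]
      rw [hs]
      exact ih anc next
    · have hm : x ∉ anc := fun hmm => hcb ((pv_contains_iff anc x).mpr hmm)
      have hs : pvStepB deps (anc, next) x = (PySem.Set.add anc x, next ++ pvGetDeps deps x) := by
        simp [pvStepB, hm]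
      rw [hs]
      obtain ⟨m1, m2⟩ := ih (PySem.Set.add anc x) (next ++ pvGetDeps deps x)
      exact ⟨fun a ha => m1 a ((PySem.Set.mem_add anc x a).mpr (Or.inl ha)),
             fun y hy => m2 y (List.mem_append_left _ hy)⟩

theorem pvFoldB_l_mem (deps : List (Int × List Int)) :
    ∀ (l : List Int) (anc next : List Int), ∀ x ∈ l, x ∈ (l.foldl (pvStepB deps) (anc, next)).1 := by
  intro l
  induction l with
  | nil => intro anc next x hx; simp at hx
  | cons z l ih =>
    intro anc next x hx
    simp only [List.foldl_cons]
    by_cases hcb : anc.contains z = true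
    · have hm : z ∈ anc := (pv_contains_iff anc z).mp hcb
      have hs : pvStepB deps (anc, next) z = (anc, next) := by simp [pvStepB, hm]
      rw [hs]
      rcases List.mem_cons.mp hx with h1 | h1
      · exact h1 ▸ (pvFoldB_mono deps l anc next).1 z hm
      · exact ih anc next x h1
    · have hm : z ∉ anc := fun hmm => hcb ((pv_contains_iff anc z).mpr hmm)
      have hs : pvStepB deps (anc, next) z = (PySem.Set.add anc z, next ++ pvGetDeps deps z) := by
        simp [pvStepB, hm]
      rw [hs]
      rcases List.mem_cons.mp hx with h1 | h1
      · exact h1 ▸ (pvFoldB_mono deps l _ _).1 z ((PySem.Set.mem_add anc z z).mpr (Or.inr rfl))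
      · exact ih _ _ x h1

theorem pvFoldB_sound1 (deps : List (Int × List Int)) :
    ∀ (l : List Int) (anc next : List Int) (y : Int),
      y ∈ (l.foldl (pvStepB deps) (anc, next)).1 → y ∈ anc ∨ y ∈ l := by
  intro l
  induction l with
  | nil => intro anc next y hy; exact Or.inl hy
  | cons x l ih =>
    intro anc next y hy
    simp only [List.foldl_cons] at hy
    by_cases hcb : anc.contains x = true
    · have hm : x ∈ anc := (pv_contains_iff anc x).mp hcb
      have hs : pvStepB deps (anc, next) x = (anc, next) := by simp [pvStepB, hm]
      rw [hs] at hy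
      rcases ih anc next y hy with h1 | h1
      · exact Or.inl h1
      · exact Or.inr (List.mem_cons_of_mem _ h1)
    · have hm : x ∉ anc := fun hmm => hcb ((pv_contains_iff anc x).mpr hmm)
      have hs : pvStepB deps (anc, next) x = (PySem.Set.add anc x, next ++ pvGetDeps deps x) := by
        simp [pvStepB, hm]
      rw [hs] at hy
      rcases ih _ _ y hy with h1 | h1
      · rcases (PySem.Set.mem_add anc x y).mp h1 with h2 | h2
        · exact Or.inl h2
        · exact Or.inr (h2 ▸ List.mem_cons_self)
      · exact Or.inr (List.mem_cons_of_mem _ h1)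

theorem pvFoldB_sound2 (deps : List (Int × List Int)) :
    ∀ (l : List Int) (anc next : List Int) (y : Int),
      y ∈ (l.foldl (pvStepB deps) (anc, next)).2 → y ∈ next ∨ ∃ x ∈ l, y ∈ pvChildren deps x := by
  intro l
  induction l with
  | nil => intro anc next y hy; exact Or.inl hy
  | cons x l ih =>
    intro anc next y hy
    simp only [List.foldl_cons] at hy
    by_cases hcb : anc.contains x = true
    · have hm : x ∈ anc := (pv_contains_iff anc x).mp hcb
      have hs : pvStepB deps (anc, next) x = (anc, next) := by simp [pvStepB, hm]
      rw [hs] at hy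
      rcases ih anc next y hy with h1 | ⟨z, hz, h2⟩
      · exact Or.inl h1
      · exact Or.inr ⟨z, List.mem_cons_of_mem _ hz, h2⟩
    · have hm : x ∉ anc := fun hmm => hcb ((pv_contains_iff anc x).mpr hmm)
      have hs : pvStepB deps (anc, next) x = (PySem.Set.add anc x, next ++ pvGetDeps deps x) := by
        simp [pvStepB, hm]
      rw [hs] at hy
      rcases ih _ _ y hy with h1 | ⟨z, hz, h2⟩
      · rcases List.mem_append.mp h1 with h2 | h2
        · exact Or.inl h2
        · exact Or.inr ⟨x, List.mem_cons_self, h2⟩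
      · exact Or.inr ⟨z, List.mem_cons_of_mem _ hz, h2⟩

theorem pvFoldB_closed (deps : List (Int × List Int)) :
    ∀ (l : List Int) (anc next : List Int) (a : Int),
      a ∈ (l.foldl (pvStepB deps) (anc, next)).1 →
      a ∈ anc ∨ ∀ c ∈ pvChildren deps a, c ∈ (l.foldl (pvStepB deps) (anc, next)).2 := by
  intro l
  induction l with
  | nil => intro anc next a ha; exact Or.inl ha
  | cons x l ih =>
    intro anc next a ha
    simp only [List.foldl_cons] at ha ⊢
    by_cases hcb : anc.contains x = true
    · have hm : x ∈ anc := (pv_contains_iff anc x).mp hcb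
      have hs : pvStepB deps (anc, next) x = (anc, next) := by simp [pvStepB, hm]
      rw [hs] at ha ⊢
      exact ih anc next a ha
    · have hm : x ∉ anc := fun hmm => hcb ((pv_contains_iff anc x).mpr hmm)
      have hs : pvStepB deps (anc, next) x = (PySem.Set.add anc x, next ++ pvGetDeps deps x) := by
        simp [pvStepB, hm]
      rw [hs] at ha ⊢
      rcases ih _ _ a ha with h1 | h1
      · rcases (PySem.Set.mem_add anc x a).mp h1 with h2 | h2
        · exact Or.inl h2
        · subst h2
          refine Or.inr fun c hch => ?_
          have : c ∈ next ++ pvGetDeps deps a := List.mem_append_right _ hch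
          exact (pvFoldB_mono deps l _ _).2 c this
      · exact Or.inr h1

theorem pvFoldB_measure (deps : List (Int × List Int)) (univ : List Int) :
    ∀ (l : List Int) (anc next : List Int), (∀ x ∈ l, x ∈ univ) →
      pvM univ (l.foldl (pvStepB deps) (anc, next)).1 ≤ pvM univ anc ∧
      (next.length < (l.foldl (pvStepB deps) (anc, next)).2.length →
        pvM univ (l.foldl (pvStepB deps) (anc, next)).1 < pvM univ anc) := by
  intro l
  induction l with
  | nil =>
    intro anc next _
    exact ⟨Nat.le_refl _, fun h => absurd h (Nat.lt_irrefl _)⟩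
  | cons x l ih =>
    intro anc next hl
    simp only [List.foldl_cons]
    by_cases hcb : anc.contains x = true
    · have hm : x ∈ anc := (pv_contains_iff anc x).mp hcb
      have hs : pvStepB deps (anc, next) x = (anc, next) := by simp [pvStepB, hm]
      rw [hs]
      exact ih anc next (fun z hz => hl z (List.mem_cons_of_mem _ hz))
    · have hm : x ∉ anc := fun hmm => hcb ((pv_contains_iff anc x).mpr hmm)
      have hs : pvStepB deps (anc, next) x = (PySem.Set.add anc x, next ++ pvGetDeps deps x) := by
        simp [pvStepB, hm]
      rw [hs]
      have hxu : x ∈ univ := hl x List.mem_cons_self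
      have hlt : pvM univ (PySem.Set.add anc x) < pvM univ anc :=
        pvM_lt univ anc x hxu (Bool.eq_false_iff.mpr hcb)
      have hle := (ih (PySem.Set.add anc x) (next ++ pvGetDeps deps x)
        (fun z hz => hl z (List.mem_cons_of_mem _ hz))).1
      exact ⟨Nat.le_of_lt (Nat.lt_of_le_of_lt hle hlt),
             fun _ => Nat.lt_of_le_of_lt hle hlt⟩

theorem pvLoopB_nil (deps : List (Int × List Int)) (fuel : Nat) (anc : List Int) :
    pvLoopB deps fuel anc [] = anc := by
  cases fuel <;> simp [pvLoopB]

theorem pvLoopB_sound (deps : List (Int × List Int)) :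
    ∀ (fuel : Nat) (anc frontier : List Int) (y : Int),
      y ∈ pvLoopB deps fuel anc frontier → y ∈ anc ∨ ∃ x ∈ frontier, pvReach deps x y := by
  intro fuel
  induction fuel with
  | zero => intro anc frontier y hy; exact Or.inl hy
  | succ f ih =>
    intro anc frontier y hy
    cases frontier with
    | nil => exact Or.inl hy
    | cons x xs =>
      have heq : pvLoopB deps (f+1) anc (x :: xs)
          = pvLoopB deps f ((x :: xs).foldl (pvStepB deps) (anc, [])).1
              ((x :: xs).foldl (pvStepB deps) (anc, [])).2 := rfl
      rw [heq] at hy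
      rcases ih _ _ y hy with h1 | ⟨z, hz, hr⟩
      · rcases pvFoldB_sound1 deps (x :: xs) anc [] y h1 with h2 | h2
        · exact Or.inl h2
        · exact Or.inr ⟨y, h2, pvReach.refl y⟩
      · rcases pvFoldB_sound2 deps (x :: xs) anc [] z hz with h2 | ⟨w, hw, h3⟩
        · simp at h2
        · exact Or.inr ⟨w, hw, pvReach.step h3 hr⟩

theorem pvLoopB_main (deps : List (Int × List Int)) (univ : List Int)
    (hU : ∀ x c : Int, c ∈ pvChildren deps x → c ∈ univ) :
    ∀ (fuel : Nat) (anc frontier : List Int),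
      pvM univ anc < fuel →
      (∀ x ∈ frontier, x ∈ univ) →
      (∀ a ∈ anc, ∀ c ∈ pvChildren deps a, c ∈ anc ∨ c ∈ frontier) →
      (∀ a ∈ anc, a ∈ pvLoopB deps fuel anc frontier) ∧
      (∀ x ∈ frontier, x ∈ pvLoopB deps fuel anc frontier) ∧
      (∀ a ∈ pvLoopB deps fuel anc frontier, ∀ c ∈ pvChildren deps a, c ∈ pvLoopB deps fuel anc frontier) := by
  intro fuel
  induction fuel with
  | zero => intro anc frontier hphi _ _; exact absurd hphi (Nat.not_lt_zero _)
  | succ f ih =>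
    intro anc frontier hphi hfr hinv
    cases frontier with
    | nil =>
      have heq : pvLoopB deps (f+1) anc [] = anc := rfl
      rw [heq]
      refine ⟨fun a ha => ha, by simp, fun a ha c hch => ?_⟩
      rcases hinv a ha c hch with h1 | h1
      · exact h1
      · simp at h1
    | cons x xs =>
      have heq : pvLoopB deps (f+1) anc (x :: xs)
          = pvLoopB deps f ((x :: xs).foldl (pvStepB deps) (anc, [])).1
              ((x :: xs).foldl (pvStepB deps) (anc, [])).2 := rfl
      have hmono := pvFoldB_mono deps (x :: xs) anc []
      have hlmem := pvFoldB_l_mem deps (x :: xs) anc []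
      have hinv' : ∀ a ∈ ((x :: xs).foldl (pvStepB deps) (anc, [])).1,
          ∀ c ∈ pvChildren deps a,
            c ∈ ((x :: xs).foldl (pvStepB deps) (anc, [])).1 ∨
            c ∈ ((x :: xs).foldl (pvStepB deps) (anc, [])).2 := by
        intro a ha c hch
        rcases pvFoldB_closed deps (x :: xs) anc [] a ha with h1 | h1
        · rcases hinv a h1 c hch with h2 | h2
          · exact Or.inl (hmono.1 c h2)
          · exact Or.inl (hlmem c h2)
        · exact Or.inr (h1 c hch)
      have hsub : ∀ z ∈ ((x :: xs).foldl (pvStepB deps) (anc, [])).2, z ∈ univ := by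
        intro z hz
        rcases pvFoldB_sound2 deps (x :: xs) anc [] z hz with h1 | ⟨w, _, h2⟩
        · simp at h1
        · exact hU w z h2
      cases hn : ((x :: xs).foldl (pvStepB deps) (anc, [])).2 with
      | nil =>
        rw [heq, hn, pvLoopB_nil]
        refine ⟨fun a ha => hmono.1 a ha, fun z hz => hlmem z hz, fun a ha c hch => ?_⟩
        rcases pvFoldB_closed deps (x :: xs) anc [] a ha with h1 | h1
        · rcases hinv a h1 c hch with h2 | h2
          · exact hmono.1 c h2
          · exact hlmem c h2
        · have := h1 c hch
          rw [hn] at this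
          simp at this
      | cons q qs =>
        have hlen : ([] : List Int).length
            < ((x :: xs).foldl (pvStepB deps) (anc, [])).2.length := by
          rw [hn]; simp
        have hdec := (pvFoldB_measure deps univ (x :: xs) anc [] hfr).2 hlen
        have hphi' : pvM univ ((x :: xs).foldl (pvStepB deps) (anc, [])).1 < f := by
          omega
        obtain ⟨g1, g2, g3⟩ := ih _ _ hphi' hsub hinv'
        rw [heq]
        exact ⟨fun a ha => g1 a (hmono.1 a ha), fun z hz => g1 z (hlmem z hz), g3⟩

theorem pvLoopB_mem_iff (deps : List (Int × List Int)) (m y : Int) :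
    y ∈ pvLoopB deps ((m :: deps.flatMap (fun p => p.2)).length + 1) PySem.Set.empty [m] ↔ pvReach deps m y := by
  have hemp : (PySem.Set.empty : PySem.Set Int) = [] := rfl
  constructor
  · intro hy
    rcases pvLoopB_sound deps _ _ _ y hy with h1 | ⟨x, hx, hr⟩
    · rw [hemp] at h1; simp at h1
    · rcases List.mem_cons.mp hx with h2 | h2
      · exact h2 ▸ hr
      · simp at h2
  · intro hr
    have hU : ∀ x c : Int, c ∈ pvChildren deps x → c ∈ m :: deps.flatMap (fun p => p.2) :=
      fun x c hc => List.mem_cons_of_mem _ (pvChildren_subset deps x c hc)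
    have hphi : pvM (m :: deps.flatMap (fun p => p.2)) PySem.Set.empty
        < (m :: deps.flatMap (fun p => p.2)).length + 1 :=
      Nat.lt_succ_of_le List.countP_le_length
    obtain ⟨g1, g2, g3⟩ := pvLoopB_main deps (m :: deps.flatMap (fun p => p.2)) hU
      ((m :: deps.flatMap (fun p => p.2)).length + 1) PySem.Set.empty [m]
      hphi (by simp) (by rw [hemp]; simp)
    exact pvReach_closed deps _ g3 m y hr (g2 m List.mem_cons_self)

-- ===== VERDICT (by name: the statement is the Claim_ definition above) =====
theorem return_ordered_ancestors_spec : Claim_equal_return_ordered_ancestors := by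
  intro m deps po _
  unfold Spec_return_ordered_ancestors
  have hA : return_ordered_ancestors m deps po
      = po.filter (fun idx =>
          (pvLoopA deps ((deps.map (fun p => p.2.length)).sum + 2) PySem.Set.empty [m]).contains idx) := rfl
  have hB : return_ordered_ancestors_alt m deps po
      = po.filter (fun idx =>
          (pvLoopB deps ((m :: deps.flatMap (fun p => p.2)).length + 1) PySem.Set.empty [m]).contains idx) := rfl
  rw [hA, hB]
  apply List.filter_congr
  intro idx _
  have h1 := pvLoopA_mem_iff deps m idx
  have h2 := pvLoopB_mem_iff deps m idx
  rw [Bool.eq_iff_iff, pv_contains_iff, pv_contains_iff, h1, h2]
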